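-- pv_equiv track=rewrite | github.com/FUKUSHUN/shun201805 | COW_PROJECT/synchronization/detection_model/detect_synchronization.py | get_change_time
-- ===== SOURCE A (Python) =====
-- def get_change_time(time_series, change_point_series):
--     """ 変化点に従って, (start, end) のリストを作る """
--     start_end_list = []
--     change_idx = [i for i, flag in enumerate(change_point_series) if flag == 1]
--     before_idx = 0
--     for i in range(1, len(change_idx)):
--         start = time_series[before_idx]
--         end = time_series[change_idx[i]]
--         start_end_list.append((start, end))
--         before_idx = change_idx[i]
--     return start_end_list
-- ===== SOURCE B (Python) =====
-- def get_change_time(time_series, change_point_series):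
--     """ 変化点に従って, (start, end) のリストを作る """
--     start_end_list = []
--     prev_idx = 0
--     seen_first = False
--     for idx, flag in enumerate(change_point_series):
--         if flag == 1:
--             if not seen_first:
--                 seen_first = True
--             else:
--                 start_end_list.append((time_series[prev_idx], time_series[idx]))
--                 prev_idx = idx
--     return start_end_list
-- ===== Notes on version B (the rewrite author's own statement) =====
-- stated objective: simpler
-- what changed: B replaces A's two-phase scheme (materialise the list of change-point indices, then index-loop over range(1, len) with repeated list subscripts) by one linear pass over enumerate(change_point_series) that maintains prev_idx and a seen_first flag and emits intervals directly.
import Mathlib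
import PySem

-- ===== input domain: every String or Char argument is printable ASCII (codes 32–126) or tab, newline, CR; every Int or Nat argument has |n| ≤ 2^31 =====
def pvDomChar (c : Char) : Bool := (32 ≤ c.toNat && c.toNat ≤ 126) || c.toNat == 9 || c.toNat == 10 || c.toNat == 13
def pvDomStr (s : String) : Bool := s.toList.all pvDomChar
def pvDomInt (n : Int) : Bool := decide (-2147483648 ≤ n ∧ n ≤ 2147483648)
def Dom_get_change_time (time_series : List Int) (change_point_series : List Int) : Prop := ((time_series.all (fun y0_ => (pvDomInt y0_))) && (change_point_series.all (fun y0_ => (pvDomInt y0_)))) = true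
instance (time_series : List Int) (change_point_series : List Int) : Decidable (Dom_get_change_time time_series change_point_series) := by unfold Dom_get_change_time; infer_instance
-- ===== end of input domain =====

-- B fuses A's two phases (build the change-index list, then index-loop over it) into one pass
-- over enumerate(change_point_series); same return value everywhere (objective: simpler).

-- ===== PORT A =====
-- time_series[...] is PySem.List.pyGetD; Pre_ guarantees every index accessed is in range
-- (Python raises IndexError otherwise). change_idx[i] appears twice, as in the two Python
-- subscript expressions 'time_series[change_idx[i]]' and 'before_idx = change_idx[i]'.
def get_change_time (time_series : List Int) (change_point_series : List Int) : List (Int × Int) :=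
  let change_idx : List Int :=
    ((PySem.List.enumerate change_point_series).filter (fun p => p.2 == 1)).map (·.1)
  let r :=
    (PySem.List.pyRange 1 (change_idx.length : Int) 1).foldl
      (fun (st : List (Int × Int) × Int) i =>
        (st.1 ++ [(PySem.List.pyGetD time_series st.2 0, PySem.List.pyGetD time_series (PySem.List.pyGetD change_idx i 0) 0)],
         PySem.List.pyGetD change_idx i 0))
      ([], 0)
  r.1

-- ===== PORT B =====
-- single fold over enumerate with state (start_end_list, prev_idx, seen_first)
def get_change_time_alt (time_series : List Int) (change_point_series : List Int) : List (Int × Int) :=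
  let st :=
    (PySem.List.enumerate change_point_series).foldl
      (fun (st : List (Int × Int) × Int × Bool) p =>
        if p.2 == 1 then
          if !st.2.2 then (st.1, st.2.1, true)
          else (st.1 ++ [(PySem.List.pyGetD time_series st.2.1 0, PySem.List.pyGetD time_series p.1 0)], p.1, true)
        else st)
      ([], 0, false)
  st.1

-- ===== PRECONDITION & SPEC =====
-- Pre_ excludes exactly the inputs where the Python A raises IndexError: when at least two
-- change points are flagged, every flagged position must be a valid index of time_series
-- (this also forces time_series ≠ [], so time_series[0] is readable); with fewer than two
-- flags A touches no index and is total.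
def Pre_get_change_time (time_series : List Int) (change_point_series : List Int) : Prop :=
  2 ≤ change_point_series.count 1 →
    ∀ p ∈ PySem.List.enumerate change_point_series, p.2 = 1 → p.1 < (time_series.length : Int)
instance (time_series : List Int) (change_point_series : List Int) : Decidable (Pre_get_change_time time_series change_point_series) := by unfold Pre_get_change_time; infer_instance

def pvWitness_get_change_time : List Int × List Int := ([10, 20, 30, 40], [1, 0, 1, 1])

def Spec_get_change_time (time_series : List Int) (change_point_series : List Int) (out : List (Int × Int)) : Prop := out = get_change_time_alt time_series change_point_series
instance (time_series : List Int) (change_point_series : List Int) (out : List (Int × Int)) : Decidable (Spec_get_change_time time_series change_point_series out) := by unfold Spec_get_change_time; infer_instance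

-- ===== CLAIM (what is proved, stated in full; the proofs are below) =====
def Claim_equal_get_change_time : Prop := ∀ (time_series : List Int) (change_point_series : List Int), Dom_get_change_time time_series change_point_series → Pre_get_change_time time_series change_point_series → Spec_get_change_time time_series change_point_series (get_change_time time_series change_point_series)

-- ===== LEMMAS AND PROOFS =====

-- common shape of both programs: the intervals emitted while walking the flagged-index list
def pvEmit (ts : List Int) : Int → List Int → List (Int × Int)
  | _, [] => []
  | prev, j :: rest =>
      (PySem.List.pyGetD ts prev 0, PySem.List.pyGetD ts j 0) :: pvEmit ts j rest

-- A's loop body, folded over the flagged-index list, computes pvEmit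
theorem pv_A_fold (ts : List Int) (js : List Int) (acc : List (Int × Int)) (prev : Int) :
    (js.foldl
      (fun (st : List (Int × Int) × Int) e =>
        (st.1 ++ [(PySem.List.pyGetD ts st.2 0, PySem.List.pyGetD ts e 0)], e))
      (acc, prev)).1 = acc ++ pvEmit ts prev js := by
  induction js generalizing acc prev with
  | nil => simp [pvEmit]
  | cons j rest ih => simp [List.foldl_cons, ih, pvEmit]

-- filtering inside B's fold = folding over the filtered index list
theorem pv_filter_fold (ts : List Int) (cps : List (Int × Int)) (st : List (Int × Int) × Int × Bool) :
    cps.foldl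
      (fun (st : List (Int × Int) × Int × Bool) p =>
        if p.2 == 1 then
          if !st.2.2 then (st.1, st.2.1, true)
          else (st.1 ++ [(PySem.List.pyGetD ts st.2.1 0, PySem.List.pyGetD ts p.1 0)], p.1, true)
        else st) st
    = ((cps.filter (fun p => p.2 == 1)).map (·.1)).foldl
      (fun (st : List (Int × Int) × Int × Bool) j =>
        if !st.2.2 then (st.1, st.2.1, true)
        else (st.1 ++ [(PySem.List.pyGetD ts st.2.1 0, PySem.List.pyGetD ts j 0)], j, true)) st := by
  induction cps generalizing st with
  | nil => rfl
  | cons p rest ih =>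
      by_cases h : (p.2 == 1) = true
      · simp only [List.foldl_cons, List.filter_cons, h, if_true, List.map_cons]
        exact ih _
      · have h2 : (p.2 == 1) = false := by simpa using h
        simp only [List.foldl_cons, List.filter_cons, h2, Bool.false_eq_true, if_false]
        exact ih st

-- B's fold after the first flag has been seen computes pvEmit
theorem pv_B_fold (ts : List Int) (js : List Int) (acc : List (Int × Int)) (prev : Int) :
    (js.foldl
      (fun (st : List (Int × Int) × Int × Bool) j =>
        if !st.2.2 then (st.1, st.2.1, true)
        else (st.1 ++ [(PySem.List.pyGetD ts st.2.1 0, PySem.List.pyGetD ts j 0)], j, true))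
      (acc, prev, true)).1 = acc ++ pvEmit ts prev js := by
  induction js generalizing acc prev with
  | nil => simp [pvEmit]
  | cons j rest ih =>
      rw [List.foldl_cons]
      show (rest.foldl _ (if (!(true : Bool)) = true then ((acc, prev, true) : List (Int × Int) × Int × Bool) else _)).1 = _
      rw [if_neg (by simp)]
      rw [ih]
      simp [pvEmit]

-- ===== VERDICT (by name: the statement is the Claim_ definition above) =====
theorem get_change_time_spec : Claim_equal_get_change_time := by
  intro ts cps _ _
  unfold Spec_get_change_time get_change_time get_change_time_alt
  dsimp only
  rw [pv_filter_fold]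
  rw [PySem.List.foldl_pyRange_pyGetD'
      (((PySem.List.enumerate cps).filter (fun p => p.2 == 1)).map (·.1)) (0 : Int)
      (fun (st : List (Int × Int) × Int) e =>
        (st.1 ++ [(PySem.List.pyGetD ts st.2 0, PySem.List.pyGetD ts e 0)], e))
      (([], 0) : List (Int × Int) × Int) (by norm_num)]
  cases hjs : ((PySem.List.enumerate cps).filter (fun p => p.2 == 1)).map (·.1) with
  | nil => rfl
  | cons j rest =>
      simp only [Int.toNat_one, List.drop_one, List.tail_cons, List.foldl_cons]
      rw [pv_A_fold]
      show _ = (rest.foldl _ (if (!(false : Bool)) = true then (([], 0, true) : List (Int × Int) × Int × Bool) else _)).1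
      rw [if_pos (by simp)]
      rw [pv_B_fold]
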